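-- pv_equiv track=rewrite | github.com/KaiserVermillion/Gemba-Hex-Color-Code-Challenge | scripts/GembaScript.py | processList
-- ===== SOURCE A (Python) =====
-- def processList(binaryRep, versions):
--     """
--     processList identifies the index of the 0 values which are in the binary represenation of the word,
--     indexes holds this information and is then used to find the binary values with 0 in the corrosponding spots.
--     This is done by finding the indecies of the 0 char within the binary values and seeing if they match up with
--     the ones from the original binary representation (binaryRep) which is passed into the method. If its a match
--     this is appended to the list.
--
--     :params binaryRep: Is the binary representation of the string we want to identify the possible combinations for
--     :params versions: Is a list of tuples that represent every combination of 0s and 1s that can exist from either a length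
--                       of 3 or 6.
--
--     :returns: The binary representations of every possible combination of a string.
--     """
--     indexes = [m for m,n in enumerate(binaryRep) if (n =='0')]
--     binaryWords = []
--     for x in versions:
--         xIndexes = [o for o,p in enumerate(list(x)) if (p == 0)]
--         if all(item in xIndexes for item in indexes):
--             binaryWords.append(x)
--     return binaryWords
-- ===== SOURCE B (Python) =====
-- def processList(binaryRep, versions):
--     indexes = [m for m, n in enumerate(binaryRep) if n == '0']
--     return [x for x in versions
--             if all(i < len(x) and x[i] == 0 for i in indexes)]
-- ===== Notes on version B (the rewrite author's own statement) =====
-- stated objective: simpler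
-- what changed: Drops the per-version xIndexes table and the nested membership scan: B tests each required zero position directly against the version (bounds-guarded positional check) in a single filter.
import Mathlib
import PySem

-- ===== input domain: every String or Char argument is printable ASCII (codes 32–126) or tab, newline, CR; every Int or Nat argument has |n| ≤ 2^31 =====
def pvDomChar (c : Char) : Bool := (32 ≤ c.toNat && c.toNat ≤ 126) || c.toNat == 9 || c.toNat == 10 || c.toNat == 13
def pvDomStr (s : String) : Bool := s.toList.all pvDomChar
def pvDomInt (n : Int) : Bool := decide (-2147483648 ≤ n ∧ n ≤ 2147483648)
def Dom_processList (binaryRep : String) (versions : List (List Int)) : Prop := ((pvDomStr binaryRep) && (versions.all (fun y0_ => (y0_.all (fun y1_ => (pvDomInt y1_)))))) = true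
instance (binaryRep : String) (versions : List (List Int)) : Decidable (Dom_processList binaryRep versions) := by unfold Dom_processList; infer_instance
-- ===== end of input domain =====

-- B drops the per-version xIndexes table and its nested membership scan, testing each
-- required zero position directly against the version in a single filter (simpler).


-- ===== PORT A =====
def processList (binaryRep : String) (versions : List (List Int)) : List (List Int) :=
  let indexes := ((PySem.List.enumerate binaryRep.toList 0).filter (fun mn => mn.2 == '0')).map (fun mn => mn.1)
  versions.foldl (fun binaryWords x =>
    let xIndexes := ((PySem.List.enumerate x 0).filter (fun op => op.2 == 0)).map (fun op => op.1)
    if indexes.all (fun item => xIndexes.contains item) then binaryWords ++ [x] else binaryWords) []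

-- ===== PORT B =====
def processList_alt (binaryRep : String) (versions : List (List Int)) : List (List Int) :=
  let indexes := ((PySem.List.enumerate binaryRep.toList 0).filter (fun mn => mn.2 == '0')).map (fun mn => mn.1)
  versions.filter (fun x =>
    indexes.all (fun i => decide (i < (x.length : Int)) && (PySem.List.pyGet? x i == some 0)))

-- ===== PRECONDITION & SPEC =====
def Spec_processList (binaryRep : String) (versions : List (List Int)) (out : List (List Int)) : Prop := out = processList_alt binaryRep versions
instance (binaryRep : String) (versions : List (List Int)) (out : List (List Int)) : Decidable (Spec_processList binaryRep versions out) := by unfold Spec_processList; infer_instance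

-- ===== CLAIM (what is proved, stated in full; the proofs are below) =====
def Claim_equal_processList : Prop := ∀ (binaryRep : String) (versions : List (List Int)), Dom_processList binaryRep versions → Spec_processList binaryRep versions (processList binaryRep versions)

-- ===== LEMMAS AND PROOFS =====

-- characterisation of membership in the zero-index list A builds per version
theorem mem_zeroIdx (x : List Int) (i : Int) :
    (i ∈ ((PySem.List.enumerate x 0).filter (fun op => op.2 == 0)).map (fun op => op.1)) ↔
    (0 ≤ i ∧ i < (x.length : Int) ∧ PySem.List.pyGet? x i = some 0) := by
  simp only [List.mem_map, List.mem_filter, PySem.List.mem_enumerate_iff]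
  constructor
  · rintro ⟨⟨m, v⟩, ⟨⟨k, hk, hmv⟩, hz⟩, hi⟩
    cases hmv
    simp only [beq_iff_eq] at hz
    subst hi
    refine ⟨by positivity, by push_cast; omega, ?_⟩
    simp [PySem.List.pyGet?_natCast, List.getElem?_eq_getElem hk, hz]
  · rintro ⟨h0, hlt, hget⟩
    have hk : i.toNat < x.length := by omega
    refine ⟨((0 : Int) + i.toNat, x[i.toNat]), ⟨⟨i.toNat, hk, rfl⟩, ?_⟩, by omega⟩
    have hi' : i = ((i.toNat : Nat) : Int) := by omega
    rw [hi', PySem.List.pyGet?_natCast, List.getElem?_eq_getElem hk] at hget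
    simpa using Option.some.inj hget

-- all is determined by the predicate's values on members
theorem all_congr_mem {α : Type} (L : List α) (p q : α → Bool)
    (h : ∀ i ∈ L, p i = q i) : L.all p = L.all q := by
  induction L with
  | nil => rfl
  | cons a t ih =>
    simp only [List.all_cons, h a (by simp), ih (fun i hi => h i (by simp [hi]))]

-- every index A collects from binaryRep is nonnegative
theorem mem_indexes_nonneg (s : List Char) (i : Int)
    (h : i ∈ ((PySem.List.enumerate s 0).filter (fun mn => mn.2 == '0')).map (fun mn => mn.1)) :
    0 ≤ i := by
  simp only [List.mem_map, List.mem_filter, PySem.List.mem_enumerate_iff] at h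
  rcases h with ⟨⟨m, v⟩, ⟨⟨k, hk, hmv⟩, _⟩, hi⟩
  cases hmv; subst hi; positivity

-- ===== VERDICT (by name: the statement is the Claim_ definition above) =====
theorem processList_spec : Claim_equal_processList := by
  intro binaryRep versions _
  unfold Spec_processList processList processList_alt
  simp only
  rw [PySem.List.foldl_append_if_eq_filter]
  simp only [List.nil_append]
  apply List.filter_congr
  intro x _
  apply all_congr_mem
  intro i hi
  have h0 := mem_indexes_nonneg binaryRep.toList i hi
  have hc := mem_zeroIdx x i
  by_cases hmem : i ∈ ((PySem.List.enumerate x 0).filter (fun op => op.2 == 0)).map (fun op => op.1)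
  · obtain ⟨_, hlt, hget⟩ := hc.mp hmem
    simp [hmem, hlt, hget]
  · have : ¬ (i < (x.length : Int) ∧ PySem.List.pyGet? x i = some 0) := by
      intro ⟨hlt, hget⟩; exact hmem (hc.mpr ⟨h0, hlt, hget⟩)
    rcases Decidable.not_and_iff_or_not.mp this with h | h <;> simp [hmem, h]
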